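-- pv_equiv track=rewrite | github.com/LiXianyao/maskTextProccessor | processData/data.py | batch_yield_data
-- ===== SOURCE A (Python) =====
-- def sentence2id(sent, word2id, unk='<UNK>'):
--     """
--     字转id，其中数字一律以数字标签处理，英文一律以英文标签处理，
--     :param sent:
--     :param word2id:
--     :return: 字的id list
--     """
--     sentence_id = []
--     for word in sent:
--         if unk == '<UNK>':
--             if word not in word2id:
--                 if word.isdigit():
--                     word = '<NUM>'
--                 elif ('\u0041' <= word <= '\u005a') or ('\u0061' <= word <= '\u007a'):
--                     word = '<ENG>'
--                 else:
--                     word = '<UNK>'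
--         else:
--             if word not in word2id:
--                 word = unk
--         sentence_id.append(word2id[word])
--     return sentence_id
--
-- def batch_yield_data(data, batch_size, vocab, unk='<UNK>'):
--     """
--     处理测试数据为batch数据，包括：字映射到id
--     数字与英文均分别处理为统一标识符
--     :param data:
--     :param batch_size:
--     :param vocab:
--     :param unk:
--     :return:
--     """
--
--     seqs = []
--     for sent_ in data:
--         if len(sent_) > 3000:
--             sent_ = sent_[:3000]
--         sent_ = sentence2id(sent_, vocab, unk)  # 句子里的每个字的id构成的list
--
--         if len(seqs) == batch_size:
--             yield seqs  # 积累的数据达到batch_size，返回当前积累的数据，并清空当前batch，下次继续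
--             seqs = []
--         seqs.append(sent_)
--
--     if len(seqs) != 0:
--         # seqs.extend([[]] * (batch_size-len(seqs)))
--         yield seqs
-- ===== SOURCE B (Python) =====
-- def _lookup_key(word, word2id, unk='<UNK>'):
--     """The vocab key a word maps to: itself if known, else the unk/tag policy."""
--     if word in word2id:
--         return word
--     if unk != '<UNK>':
--         return unk
--     if word.isdigit():
--         return '<NUM>'
--     if '\u0041' <= word <= '\u005a' or '\u0061' <= word <= '\u007a':
--         return '<ENG>'
--     return '<UNK>'
--
--
-- def batch_yield_data(data, batch_size, vocab, unk='<UNK>'):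
--     # Phase 1: materialize every processed sentence (truncated to 3000 tokens).
--     items = [[vocab[_lookup_key(w, vocab, unk)] for w in sent[:3000]] for sent in data]
--     # Phase 2: emit fixed-size slices of the prebuilt list.
--     i = 0
--     while i < len(items):
--         yield items[i:i + batch_size]
--         i += batch_size
-- ===== Notes on version B (the rewrite author's own statement) =====
-- stated objective: alternative
-- what changed: Replaces the running accumulator with its flush-before-append bookkeeping by a two-phase decomposition: first map every sentence to its id list (lookup key computed by a small pure helper instead of branch-and-reassign), then emit batches by slicing the prebuilt list at index steps of batch_size.
-- outside the precondition, e.g. on batch_yield_data([['a']], -1, {'a': 1}, 'a'): A returns [[[1]]], B does not finish within the time limit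
import Mathlib
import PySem

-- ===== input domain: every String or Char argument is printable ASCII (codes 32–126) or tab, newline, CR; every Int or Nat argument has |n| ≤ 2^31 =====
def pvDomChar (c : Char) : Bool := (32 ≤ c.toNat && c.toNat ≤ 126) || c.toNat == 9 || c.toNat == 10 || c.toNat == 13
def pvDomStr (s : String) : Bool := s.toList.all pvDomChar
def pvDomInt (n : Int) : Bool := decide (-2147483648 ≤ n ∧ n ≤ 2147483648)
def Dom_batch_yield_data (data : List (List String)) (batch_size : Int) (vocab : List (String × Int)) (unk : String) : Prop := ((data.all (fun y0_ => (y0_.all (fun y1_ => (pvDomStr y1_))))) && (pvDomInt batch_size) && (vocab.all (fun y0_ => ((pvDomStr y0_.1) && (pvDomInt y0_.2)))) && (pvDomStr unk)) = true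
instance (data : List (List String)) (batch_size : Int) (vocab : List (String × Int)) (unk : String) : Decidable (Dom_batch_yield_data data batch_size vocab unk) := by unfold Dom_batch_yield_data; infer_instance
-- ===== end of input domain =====

-- B replaces A's running accumulator with flush-before-append by a two-phase
-- decomposition (map every sentence to ids, then slice the prebuilt list in
-- steps of batch_size); same cost, objective: alternative.  Both Pythons are
-- generators; equivalence is about the list of yielded values.

-- Python's `a <= b` on strings is `not (b < a)`; strings compare by code points,
-- which is PySem.Chars.strLt on the char lists (exact for all inputs).
def pyStrLe (a b : String) : Bool := !(PySem.Chars.strLt b.toList a.toList)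

-- ===== PORT A =====
-- sentence2id: loop appending word2id[word] after the branch-and-reassign of `word`
def sentence2id (sent : List String) (word2id : PySem.Dict String Int) (unk : String) : List Int :=
  sent.foldl (fun sentence_id word =>
    let word :=
      if unk = "<UNK>" then
        if ¬ word2id.contains word then
          if PySem.Str.strIsdigit word then "<NUM>"
          else if (pyStrLe "A" word && pyStrLe word "Z") || (pyStrLe "a" word && pyStrLe word "z") then "<ENG>"
          else "<UNK>"
        else word
      else
        if ¬ word2id.contains word then unk else word
    -- word2id[word] raises KeyError when absent: Pre_ requires the key; getD is exact there
    sentence_id ++ [word2id.getD word 0]) []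

def batch_yield_data (data : List (List String)) (batch_size : Int) (vocab : List (String × Int)) (unk : String) : List (List (List Int)) :=
  let vocabD := PySem.Dict.ofList vocab      -- the Python `vocab` argument is a dict
  let st := data.foldl (fun (st : List (List Int) × List (List (List Int))) sent_ =>
      let sent_ := if (sent_.length : Int) > 3000 then PySem.List.slice sent_ none (some 3000) else sent_
      let sent_ := sentence2id sent_ vocabD unk
      -- `if len(seqs)==batch_size: yield seqs; seqs=[]` then `seqs.append(sent_)`
      let p := if (st.1.length : Int) = batch_size then (([] : List (List Int)), st.2 ++ [st.1]) else (st.1, st.2)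
      (p.1 ++ [sent_], p.2)) ([], [])
  if st.1 ≠ [] then st.2 ++ [st.1] else st.2

-- ===== PORT B =====
def lookup_key (word : String) (word2id : PySem.Dict String Int) (unk : String) : String :=
  if word2id.contains word then word
  else if unk ≠ "<UNK>" then unk
  else if PySem.Str.strIsdigit word then "<NUM>"
  else if (pyStrLe "A" word && pyStrLe word "Z") || (pyStrLe "a" word && pyStrLe word "z") then "<ENG>"
  else "<UNK>"

-- the `while i < len(items)` loop; fuel only makes the recursion total (Pre_ has 1 ≤ batch_size)
def chunkLoop (b : Int) (items : List (List Int)) : Nat → Int → List (List (List Int))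
  | 0, _ => []
  | fuel + 1, i =>
      if i < (items.length : Int) then
        PySem.List.slice items (some i) (some (i + b)) :: chunkLoop b items fuel (i + b)
      else []

def batch_yield_data_alt (data : List (List String)) (batch_size : Int) (vocab : List (String × Int)) (unk : String) : List (List (List Int)) :=
  let vocabD := PySem.Dict.ofList vocab
  let items := data.map (fun sent =>
    (PySem.List.slice sent none (some 3000)).map (fun w => vocabD.getD (lookup_key w vocabD unk) 0))
  chunkLoop batch_size items (items.length + 1) 0

-- ===== PRECONDITION & SPEC =====
-- Pre_ excludes (a) inputs whose word/tag/unk lookup key is absent from vocab, on which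
-- Python A raises KeyError, and (b) non-positive batch_size with nonempty data, on which
-- B's while-loop never returns (A's values there — a leading empty batch for 0, one
-- unbounded batch for negatives — are leftover-state accidents nobody would specify).
def Pre_batch_yield_data (data : List (List String)) (batch_size : Int) (vocab : List (String × Int)) (unk : String) : Prop :=
  (data = [] ∨ 1 ≤ batch_size) ∧
  ∀ sent ∈ data, ∀ w ∈ sent.take 3000,
    (PySem.Dict.ofList vocab).contains (lookup_key w (PySem.Dict.ofList vocab) unk) = true

instance (data : List (List String)) (batch_size : Int) (vocab : List (String × Int)) (unk : String) : Decidable (Pre_batch_yield_data data batch_size vocab unk) := by unfold Pre_batch_yield_data; infer_instance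

def pvWitness_batch_yield_data : List (List String) × Int × (List (String × Int)) × String :=
  ([["a"], ["b", "7"], ["!"]], 2, [("a", 10), ("b", 11), ("<NUM>", 12), ("<UNK>", 13)], "<UNK>")

def Spec_batch_yield_data (data : List (List String)) (batch_size : Int) (vocab : List (String × Int)) (unk : String) (out : List (List (List Int))) : Prop := out = batch_yield_data_alt data batch_size vocab unk
instance (data : List (List String)) (batch_size : Int) (vocab : List (String × Int)) (unk : String) (out : List (List (List Int))) : Decidable (Spec_batch_yield_data data batch_size vocab unk out) := by unfold Spec_batch_yield_data; infer_instance

-- ===== CLAIM (what is proved, stated in full; the proofs are below) =====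
def Claim_equal_batch_yield_data : Prop := ∀ (data : List (List String)) (batch_size : Int) (vocab : List (String × Int)) (unk : String), Dom_batch_yield_data data batch_size vocab unk → Pre_batch_yield_data data batch_size vocab unk → Spec_batch_yield_data data batch_size vocab unk (batch_yield_data data batch_size vocab unk)

-- ===== LEMMAS AND PROOFS =====

-- common characterization of both batching loops: chunks of size b, last one partial
def pchunks (b : Nat) : List (List Int) → List (List (List Int))
  | [] => []
  | x :: xs => (x :: xs.take (b - 1)) :: pchunks b (xs.drop (b - 1))
  termination_by l => l.length
  decreasing_by simp [List.length_drop]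

-- the per-sentence processing of the two programs agree (unconditionally)
lemma sentence_eq (sent : List String) (d : PySem.Dict String Int) (unk : String) :
    sentence2id (if (sent.length : Int) > 3000 then PySem.List.slice sent none (some 3000) else sent) d unk
      = (PySem.List.slice sent none (some 3000)).map (fun w => d.getD (lookup_key w d unk) 0) := by
  have hsl : PySem.List.slice sent none (some 3000) = sent.take 3000 := by
    simp [pysem]
  have hcond : (if (sent.length : Int) > 3000 then PySem.List.slice sent none (some 3000) else sent)
      = sent.take 3000 := by
    rw [hsl]; split_ifs with h
    · rfl
    · exact (List.take_of_length_le (by omega)).symm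
  rw [hcond, hsl]
  unfold sentence2id
  rw [PySem.List.foldl_append_singleton_eq_map]
  simp only [List.nil_append]
  refine List.map_congr_left (fun w _ => ?_)
  congr 1
  unfold lookup_key
  by_cases hu : unk = "<UNK>" <;> by_cases hc : d.contains w = true <;>
    simp [hu, hc]

-- A's flush-before-append accumulator fold computes pchunks
lemma aloop_eq (b : Int) (hb : 1 ≤ b) (f : List String → List Int) :
    ∀ (l : List (List String)) (seqs : List (List Int)) (out : List (List (List Int))),
      (seqs.length : Int) ≤ b →
      (let st := l.foldl (fun (st : List (List Int) × List (List (List Int))) sent_ =>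
          let s := f sent_
          let p := if (st.1.length : Int) = b then (([] : List (List Int)), st.2 ++ [st.1]) else (st.1, st.2)
          (p.1 ++ [s], p.2)) (seqs, out);
       if st.1 ≠ [] then st.2 ++ [st.1] else st.2)
        = out ++ pchunks b.toNat (seqs ++ l.map f) := by
  intro l
  induction l with
  | nil =>
      intro seqs out hlen
      cases seqs with
      | nil => simp [pchunks]
      | cons y ys =>
          have h1 : ys.take (b.toNat - 1) = ys := List.take_of_length_le (by simp at hlen; omega)
          have h2 : ys.drop (b.toNat - 1) = [] := List.drop_eq_nil_of_le (by simp at hlen; omega)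
          simp [pchunks, h1, h2]
  | cons sent rest ih =>
      intro seqs out hlen
      simp only [List.foldl_cons, List.map_cons]
      by_cases h : (seqs.length : Int) = b
      · -- flush: yield seqs, restart with [f sent]
        cases seqs with
        | nil => exfalso; simp at h; omega
        | cons y ys =>
            have hys : ys.length = b.toNat - 1 := by simp at h; omega
            have hrec := ih [f sent] (out ++ [y :: ys]) (by simp; omega)
            have hch : pchunks b.toNat ((y :: ys) ++ f sent :: List.map f rest)
                = (y :: ys) :: pchunks b.toNat (f sent :: List.map f rest) := by
              rw [List.cons_append, pchunks, ← hys, List.take_left, List.drop_left]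
            simp only [List.length_cons] at h
            simp only [h, if_pos, List.length_cons, List.nil_append]
            rw [hrec, hch]
            simp
      · -- accumulate
        have := ih (seqs ++ [f sent]) out (by simp; omega)
        simp only [if_neg h] at this ⊢
        rw [this]
        simp

-- B's index-stepping slice loop computes pchunks
lemma bloop_eq (b : Int) (hb : 1 ≤ b) :
    ∀ (fuel : ℕ) (items : List (List Int)) (i : Int), 0 ≤ i →
      (items.drop i.toNat).length < fuel →
      chunkLoop b items fuel i = pchunks b.toNat (items.drop i.toNat) := by
  intro fuel
  induction fuel with
  | zero => intro items i h0 hf; exact absurd hf (Nat.not_lt_zero _)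
  | succ fuel ih =>
      intro items i h0 hf
      rw [chunkLoop]
      by_cases h : i < (items.length : Int)
      · have hi : i.toNat < items.length := by omega
        obtain ⟨b1, hb1⟩ : ∃ b1, b.toNat = b1 + 1 := ⟨b.toNat - 1, by omega⟩
        obtain ⟨x, xs, hD⟩ : ∃ x xs, items.drop i.toNat = x :: xs := by
          cases hE : items.drop i.toNat with
          | nil => exfalso; have := List.length_drop (l := items) (i := i.toNat); rw [hE] at this; simp at this; omega
          | cons x xs => exact ⟨x, xs, rfl⟩
        have hslice : PySem.List.slice items (some i) (some (i + b)) = x :: xs.take b1 := by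
          rw [PySem.List.slice_toNat items h0 (by omega)]
          have : (i + b).toNat - i.toNat = b.toNat := by omega
          rw [this, hD, hb1, List.take_succ_cons]
        have hdrop : items.drop (i + b).toNat = xs.drop b1 := by
          have h1 : items.drop (i + b).toNat = (items.drop i.toNat).drop b.toNat := by
            rw [List.drop_drop]; congr 1; omega
          rw [h1, hD, hb1, List.drop_succ_cons]
        have hfd : (items.drop (i + b).toNat).length < fuel := by
          have hL := congrArg List.length hD
          simp only [List.length_drop, List.length_cons] at hL
          rw [hdrop]
          simp only [List.length_drop]
          simp only [List.length_drop] at hf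
          omega
        rw [if_pos h, ih items (i + b) (by omega) hfd, hslice, hdrop, hD, pchunks, hb1]
        simp
      · rw [if_neg h]
        rw [List.drop_eq_nil_of_le (by omega : items.length ≤ i.toNat), pchunks]

-- ===== VERDICT (by name: the statement is the Claim_ definition above) =====
theorem batch_yield_data_spec : Claim_equal_batch_yield_data := by
  intro data batch_size vocab unk _hdom hpre
  unfold Spec_batch_yield_data
  obtain ⟨hbs, -⟩ := hpre
  rcases hbs with hnil | hb
  · subst hnil
    simp [batch_yield_data, batch_yield_data_alt, chunkLoop]
  · have hA := aloop_eq batch_size hb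
      (fun sent_ => sentence2id (if (sent_.length : Int) > 3000 then PySem.List.slice sent_ none (some 3000) else sent_) (PySem.Dict.ofList vocab) unk)
      data [] [] (by simp; omega)
    have hB := bloop_eq batch_size hb (((data.map (fun sent =>
        (PySem.List.slice sent none (some 3000)).map (fun w => (PySem.Dict.ofList vocab).getD (lookup_key w (PySem.Dict.ofList vocab) unk) 0))).length) + 1)
      (data.map (fun sent =>
        (PySem.List.slice sent none (some 3000)).map (fun w => (PySem.Dict.ofList vocab).getD (lookup_key w (PySem.Dict.ofList vocab) unk) 0)))
      0 le_rfl (by simp)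
    have hmaps : data.map (fun sent_ => sentence2id (if (sent_.length : Int) > 3000 then PySem.List.slice sent_ none (some 3000) else sent_) (PySem.Dict.ofList vocab) unk)
        = data.map (fun sent =>
            (PySem.List.slice sent none (some 3000)).map (fun w => (PySem.Dict.ofList vocab).getD (lookup_key w (PySem.Dict.ofList vocab) unk) 0)) :=
      List.map_congr_left (fun sent _ => sentence_eq sent (PySem.Dict.ofList vocab) unk)
    calc batch_yield_data data batch_size vocab unk
        = [] ++ pchunks batch_size.toNat ([] ++ data.map (fun sent_ => sentence2id (if (sent_.length : Int) > 3000 then PySem.List.slice sent_ none (some 3000) else sent_) (PySem.Dict.ofList vocab) unk)) := hA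
      _ = batch_yield_data_alt data batch_size vocab unk := by
          rw [List.nil_append, List.nil_append, hmaps]
          exact (hB.trans (by norm_num)).symm
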